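-- pv_equiv track=rewrite | github.com/bnkvkr/1901EE68_2021 | tut01/tut01.py | meraki_helper
-- ===== SOURCE A (Python) =====
-- def meraki_helper(n):
--     prev = n % 10
--     n = n//10
--
--     while(n > 0):
--         next = n % 10
--         if(abs(next - prev) != 1):
--             return 0
--         n = n//10
--         prev = next
--     return 1
-- ===== SOURCE B (Python) =====
-- def meraki_helper(n):
--     if n < 10:
--         return 1
--     s = str(n)
--     return 1 if all(abs(ord(a) - ord(b)) == 1 for a, b in zip(s, s[1:])) else 0
-- ===== Notes on version B (the rewrite author's own statement) =====
-- stated objective: idiomatic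
-- what changed: B replaces A's arithmetic %10//10 digit-extraction loop with the string representation str(n) and a single all() over adjacent character pairs (digit characters are consecutive in ASCII, so ord differences equal digit differences).
import Mathlib
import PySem

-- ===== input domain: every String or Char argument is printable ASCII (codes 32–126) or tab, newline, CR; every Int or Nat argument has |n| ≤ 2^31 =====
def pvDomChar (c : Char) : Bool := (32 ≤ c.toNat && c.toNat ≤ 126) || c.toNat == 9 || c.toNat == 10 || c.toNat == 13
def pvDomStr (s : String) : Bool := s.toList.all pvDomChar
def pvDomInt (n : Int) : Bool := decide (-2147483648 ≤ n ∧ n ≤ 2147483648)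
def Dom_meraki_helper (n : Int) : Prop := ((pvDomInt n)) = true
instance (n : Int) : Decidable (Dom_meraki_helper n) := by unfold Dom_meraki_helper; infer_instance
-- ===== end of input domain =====

-- B replaces A's arithmetic %10//10 digit-extraction loop with str(n) and one pass over
-- adjacent character pairs (objective: idiomatic; same cost).

-- ===== PORT A =====
-- the while loop of A: state (n, prev); n//10 strictly shrinks n.toNat while n > 0
def merakiLoop (n prev : Int) : Int :=
  if _h : n > 0 then
    let next := PySem.Int.mod n 10
    if |next - prev| ≠ 1 then 0
    else merakiLoop (PySem.Int.floordiv n 10) next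
  else 1
termination_by n.toNat
decreasing_by
  have h1 := Int.fmod_add_mul_fdiv n 10
  have h2 := Int.fmod_eq_emod_of_nonneg n (by omega : (0:Int) ≤ 10)
  simp only [PySem.Int.floordiv]
  omega

def meraki_helper (n : Int) : Int :=
  merakiLoop (PySem.Int.floordiv n 10) (PySem.Int.mod n 10)

-- ===== PORT B =====
-- all(abs(ord(a) - ord(b)) == 1 for a, b in zip(s, s[1:]))
def adjOk (s : List Char) : Bool :=
  (s.zip s.tail).all (fun p => ((p.1.toNat : Int) - (p.2.toNat : Int)).natAbs == 1)

def meraki_helper_alt (n : Int) : Int :=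
  if n < 10 then 1
  else
    let s := (PySem.Int.toStr n).toList
    if adjOk s then 1 else 0

-- ===== PRECONDITION & SPEC =====
def Spec_meraki_helper (n : Int) (out : Int) : Prop := out = meraki_helper_alt n
instance (n : Int) (out : Int) : Decidable (Spec_meraki_helper n out) := by unfold Spec_meraki_helper; infer_instance

-- ===== CLAIM (what is proved, stated in full; the proofs are below) =====
def Claim_equal_meraki_helper : Prop := ∀ (n : Int), Dom_meraki_helper n → Spec_meraki_helper n (meraki_helper n)

-- ===== LEMMAS AND PROOFS =====

-- Python % and // with divisor 10, in omega-friendly form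
lemma pyMod10 (a : Int) : PySem.Int.mod a 10 = a % 10 :=
  Int.fmod_eq_emod_of_nonneg a (by omega)

lemma pyDiv10 (a : Int) : 10 * PySem.Int.floordiv a 10 = a - a % 10 := by
  have h1 := Int.fmod_add_mul_fdiv a 10
  have h2 := Int.fmod_eq_emod_of_nonneg a (by omega : (0:Int) ≤ 10)
  simp only [PySem.Int.floordiv]
  omega

lemma pyMod10_cast (m : Nat) : PySem.Int.mod (m : Int) 10 = ((m % 10 : Nat) : Int) := by
  rw [pyMod10]; omega

lemma pyDiv10_cast (m : Nat) : PySem.Int.floordiv (m : Int) 10 = ((m / 10 : Nat) : Int) := by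
  have := pyDiv10 (m : Int)
  omega

-- most-significant-first decimal digit characters of a natural number
def digitChars (m : Nat) : List Char :=
  if h : m / 10 = 0 then [Nat.digitChar (m % 10)]
  else digitChars (m / 10) ++ [Nat.digitChar (m % 10)]
termination_by m
decreasing_by exact Nat.div_lt_self (by omega) (by omega)

lemma toDigitsCore_eq_digitChars :
    ∀ (f m : Nat) (ds : List Char), m < f →
      Nat.toDigitsCore 10 f m ds = digitChars m ++ ds := by
  intro f
  induction f with
  | zero => intro m ds h; omega
  | succ f ih =>
    intro m ds h
    rw [Nat.toDigitsCore]
    by_cases h10 : m / 10 = 0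
    · simp [h10, digitChars]
    · simp only [h10, if_false]
      have hlt : m / 10 < m := Nat.div_lt_self (by omega) (by omega)
      rw [ih (m / 10) _ (by omega)]
      conv_rhs => rw [digitChars]
      simp [h10, List.append_assoc]

lemma toDigits_eq_digitChars (m : Nat) :
    Nat.toDigits 10 m = digitChars m := by
  have := toDigitsCore_eq_digitChars (m + 1) m [] (by omega)
  simpa [Nat.toDigits] using this

-- recursive form of B's adjacency check
def adjRec : List Char → Bool
  | a :: b :: t => (((a.toNat : Int) - (b.toNat : Int)).natAbs == 1) && adjRec (b :: t)
  | _ => true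

lemma adjOk_eq_adjRec : ∀ s : List Char, adjOk s = adjRec s := by
  intro s
  induction s with
  | nil => rfl
  | cons a t ih =>
    cases t with
    | nil => rfl
    | cons b u =>
      simp only [adjOk, adjRec, List.tail_cons, List.zip_cons_cons, List.all_cons] at *
      rw [← ih]

lemma adjRec_append_two (xs : List Char) (a b : Char) :
    adjRec (xs ++ [a, b]) =
      (adjRec (xs ++ [a]) && (((a.toNat : Int) - (b.toNat : Int)).natAbs == 1)) := by
  induction xs with
  | nil => simp [adjRec, Bool.and_comm]
  | cons x t ih =>
    cases t with
    | nil => simp [adjRec]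
    | cons y u =>
      simp only [List.cons_append, adjRec] at *
      rw [ih, Bool.and_assoc]

lemma digitChar_toNat {d : Nat} (h : d < 10) : (Nat.digitChar d).toNat = d + 48 := by
  interval_cases d <;> decide

lemma digitChar_natAbs {a b : Nat} (ha : a < 10) (hb : b < 10) :
    ((((Nat.digitChar a).toNat : Int) - ((Nat.digitChar b).toNat : Int)).natAbs == 1) =
      (((a : Int) - (b : Int)).natAbs == 1) := by
  rw [digitChar_toNat ha, digitChar_toNat hb]
  congr 1
  omega

-- the main loop invariant: for m > 0 and a digit p, merakiLoop m p checks the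
-- adjacency of all pairs of (digitChars m ++ [digitChar p])
lemma adjRec_single (a : Char) : adjRec [a] = true := rfl

lemma adjRec_pair (a b : Char) :
    adjRec [a, b] = (((a.toNat : Int) - (b.toNat : Int)).natAbs == 1) := by
  show (_ && adjRec [b]) = _
  rw [adjRec_single, Bool.and_true]

lemma merakiLoop_eq (m : Nat) (hm : 0 < m) (p : Nat) (hp : p < 10) :
    merakiLoop (m : Int) (p : Int) =
      (if adjRec (digitChars m ++ [Nat.digitChar p]) then 1 else 0) := by
  induction m using Nat.strong_induction_on generalizing p with
  | _ m ih =>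
  rw [merakiLoop, dif_pos (by exact_mod_cast hm : (m : Int) > 0)]
  simp only [pyMod10_cast, pyDiv10_cast]
  have hmod10 : m % 10 < 10 := Nat.mod_lt _ (by omega)
  by_cases hadj : (((m % 10 : Nat) : Int) - (p : Int)).natAbs = 1
  · rw [if_neg (by rw [Int.abs_eq_natAbs]; omega)]
    have hbeq : ((((m % 10 : Nat) : Int) - (p : Int)).natAbs == 1) = true := by
      simpa using hadj
    by_cases h10 : m / 10 = 0
    · -- last digit: the recursive call has n = 0 and returns 1
      rw [show ((m / 10 : Nat) : Int) = ((0 : Nat) : Int) by rw [h10],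
        merakiLoop, dif_neg (by omega)]
      conv_rhs => rw [digitChars, dif_pos h10]
      rw [List.singleton_append, adjRec_pair, digitChar_natAbs hmod10 hp, hbeq,
        if_pos rfl]
    · have hlt : m / 10 < m := Nat.div_lt_self hm (by omega)
      rw [ih (m / 10) hlt (by omega) (m % 10) hmod10]
      conv_rhs => rw [digitChars, dif_neg h10]
      rw [List.append_assoc,
        show [Nat.digitChar (m % 10)] ++ [Nat.digitChar p] = [Nat.digitChar (m % 10), Nat.digitChar p] from rfl,
        adjRec_append_two, digitChar_natAbs hmod10 hp, hbeq, Bool.and_true]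
  · rw [if_pos (by rw [Int.abs_eq_natAbs]; omega)]
    -- A returns 0; B's check fails on the last pair
    have hbeq : ((((m % 10 : Nat) : Int) - (p : Int)).natAbs == 1) = false := by
      simpa using hadj
    by_cases h10 : m / 10 = 0
    · conv_rhs => rw [digitChars, dif_pos h10]
      rw [List.singleton_append, adjRec_pair, digitChar_natAbs hmod10 hp, hbeq]
      simp
    · conv_rhs => rw [digitChars, dif_neg h10]
      rw [List.append_assoc,
        show [Nat.digitChar (m % 10)] ++ [Nat.digitChar p] = [Nat.digitChar (m % 10), Nat.digitChar p] from rfl,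
        adjRec_append_two, digitChar_natAbs hmod10 hp, hbeq, Bool.and_false]
      simp

-- ===== VERDICT (by name: the statement is the Claim_ definition above) =====
theorem meraki_helper_spec : Claim_equal_meraki_helper := by
  intro n _
  show meraki_helper n = meraki_helper_alt n
  by_cases hn : n < 10
  · -- A: n//10 ≤ 0, the loop never runs; B: the n < 10 guard
    have hfd := pyDiv10 n
    have hm := pyMod10 n
    rw [meraki_helper, merakiLoop, dif_neg (by omega), meraki_helper_alt, if_pos hn]
  · rw [Int.not_lt] at hn
    set m := n.toNat with hmdef
    have hn' : n = (m : Int) := by omega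
    have hm : 10 ≤ m := by omega
    rw [meraki_helper, hn', pyMod10_cast, pyDiv10_cast,
      merakiLoop_eq (m / 10) (by omega) (m % 10) (Nat.mod_lt _ (by omega))]
    have hs : (PySem.Int.toStr ((m : Nat) : Int)).toList = digitChars m := by
      rw [show (PySem.Int.toStr ((m : Nat) : Int)).toList = PySem.Int.toChars ((m : Nat) : Int) from
        PySem.Int.toList_toStr _]
      rw [PySem.Int.toChars, if_neg (by omega)]
      simp [toDigits_eq_digitChars]
    simp only [meraki_helper_alt, if_neg (show ¬ ((m : Int) < 10) by omega), hs, adjOk_eq_adjRec]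
    conv_rhs => rw [digitChars, dif_neg (show ¬ (m / 10 = 0) by omega)]
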